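-- pv_equiv track=rewrite | github.com/STAR-Laboratory/PRAC_TC_ISCA25 | TPRAC/champsim-ramulator2/ramulator2/script/sim_scripts/TPRAC/calc_rh_parameters.py | get_abo_only_parameters
-- ===== SOURCE A (Python) =====
-- def get_abo_only_parameters(tRH):
--     nrh_nbo_pairs = [
--         (128, 100),
--         (256, 250),
--         (512, 500),
--         (1024, 1000),
--         (2048, 2000),
--         (4096, 4000),
--     ]
--     for nrh, NBO in nrh_nbo_pairs:
--         if tRH <= nrh:
--             return NBO
--     return 32
-- ===== SOURCE B (Python) =====
-- import bisect
--
-- _NRH = [128, 256, 512, 1024, 2048, 4096]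
-- _NBO = [100, 250, 500, 1000, 2000, 4000]
--
-- def get_abo_only_parameters(tRH):
--     i = bisect.bisect_left(_NRH, tRH)
--     return _NBO[i] if i < len(_NRH) else 32
-- ===== Notes on version B (the rewrite author's own statement) =====
-- stated objective: idiomatic
-- what changed: Replaces the element-by-element scan over (threshold, NBO) pairs with a bisect_left binary search over a sorted threshold table plus a parallel value table.
import Mathlib
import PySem

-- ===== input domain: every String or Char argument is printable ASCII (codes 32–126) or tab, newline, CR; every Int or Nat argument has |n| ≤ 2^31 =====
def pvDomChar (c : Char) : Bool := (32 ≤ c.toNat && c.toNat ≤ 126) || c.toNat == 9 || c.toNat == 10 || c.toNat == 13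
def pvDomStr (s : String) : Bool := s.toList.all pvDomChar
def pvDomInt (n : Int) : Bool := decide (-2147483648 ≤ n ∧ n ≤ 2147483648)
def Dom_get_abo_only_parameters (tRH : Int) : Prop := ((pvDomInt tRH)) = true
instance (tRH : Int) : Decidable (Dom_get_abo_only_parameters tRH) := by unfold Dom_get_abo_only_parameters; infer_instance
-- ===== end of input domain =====

-- B looks the NBO value up by binary search (bisect_left) over a sorted threshold
-- table instead of A's linear scan over (threshold, value) pairs; return values agree.

-- ===== PORT A =====
-- the for-loop over the pair list, with early return, as structural recursion
def pvScanPairs (tRH : Int) : List (Int × Int) → Int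
  | [] => 32
  | (nrh, nbo) :: rest => if tRH ≤ nrh then nbo else pvScanPairs tRH rest

def get_abo_only_parameters (tRH : Int) : Int :=
  pvScanPairs tRH [(128, 100), (256, 250), (512, 500), (1024, 1000), (2048, 2000), (4096, 4000)]

-- ===== PORT B =====
def pvNRH : List Int := [128, 256, 512, 1024, 2048, 4096]
def pvNBO : List Int := [100, 250, 500, 1000, 2000, 4000]

-- bisect.bisect_left: binary search while lo < hi; fuel only guarantees termination
def pvBisectGo (xs : List Int) (x : Int) : Nat → Nat → Nat → Nat
  | 0, lo, _ => lo
  | f + 1, lo, hi =>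
    if lo < hi then
      let mid := (lo + hi) / 2
      if xs.getD mid 0 < x then pvBisectGo xs x f (mid + 1) hi
      else pvBisectGo xs x f lo mid
    else lo

def pvBisectLeft (xs : List Int) (x : Int) : Nat :=
  pvBisectGo xs x (xs.length + 1) 0 xs.length

def get_abo_only_parameters_alt (tRH : Int) : Int :=
  let i := pvBisectLeft pvNRH tRH
  if i < pvNRH.length then pvNBO.getD i 32 else 32

-- ===== PRECONDITION & SPEC =====
def Spec_get_abo_only_parameters (tRH : Int) (out : Int) : Prop := out = get_abo_only_parameters_alt tRH
instance (tRH : Int) (out : Int) : Decidable (Spec_get_abo_only_parameters tRH out) := by unfold Spec_get_abo_only_parameters; infer_instance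

-- ===== CLAIM (what is proved, stated in full; the proofs are below) =====
def Claim_equal_get_abo_only_parameters : Prop := ∀ (tRH : Int), Dom_get_abo_only_parameters tRH → Spec_get_abo_only_parameters tRH (get_abo_only_parameters tRH)

-- ===== LEMMAS AND PROOFS =====

-- ===== VERDICT (by name: the statement is the Claim_ definition above) =====
theorem get_abo_only_parameters_spec : Claim_equal_get_abo_only_parameters := by
  intro tRH _
  unfold Spec_get_abo_only_parameters get_abo_only_parameters get_abo_only_parameters_alt
    pvBisectLeft pvNRH pvNBO
  by_cases h0 : tRH ≤ 128
  · simp [pvScanPairs, pvBisectGo, h0, show ¬((128 : Int) < tRH) by omega, show ¬((256 : Int) < tRH) by omega, show ¬((512 : Int) < tRH) by omega, show ¬((1024 : Int) < tRH) by omega, show ¬((2048 : Int) < tRH) by omega, show ¬((4096 : Int) < tRH) by omega]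
  by_cases h1 : tRH ≤ 256
  · simp [pvScanPairs, pvBisectGo, h0, h1, show (128 : Int) < tRH by omega, show ¬((256 : Int) < tRH) by omega, show ¬((512 : Int) < tRH) by omega, show ¬((1024 : Int) < tRH) by omega, show ¬((2048 : Int) < tRH) by omega, show ¬((4096 : Int) < tRH) by omega]
  by_cases h2 : tRH ≤ 512
  · simp [pvScanPairs, pvBisectGo, h0, h1, h2, show (128 : Int) < tRH by omega, show (256 : Int) < tRH by omega, show ¬((512 : Int) < tRH) by omega, show ¬((1024 : Int) < tRH) by omega, show ¬((2048 : Int) < tRH) by omega, show ¬((4096 : Int) < tRH) by omega]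
  by_cases h3 : tRH ≤ 1024
  · simp [pvScanPairs, pvBisectGo, h0, h1, h2, h3, show (128 : Int) < tRH by omega, show (256 : Int) < tRH by omega, show (512 : Int) < tRH by omega, show ¬((1024 : Int) < tRH) by omega, show ¬((2048 : Int) < tRH) by omega, show ¬((4096 : Int) < tRH) by omega]
  by_cases h4 : tRH ≤ 2048
  · simp [pvScanPairs, pvBisectGo, h0, h1, h2, h3, h4, show (128 : Int) < tRH by omega, show (256 : Int) < tRH by omega, show (512 : Int) < tRH by omega, show (1024 : Int) < tRH by omega, show ¬((2048 : Int) < tRH) by omega, show ¬((4096 : Int) < tRH) by omega]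
  by_cases h5 : tRH ≤ 4096
  · simp [pvScanPairs, pvBisectGo, h0, h1, h2, h3, h4, h5, show (128 : Int) < tRH by omega, show (256 : Int) < tRH by omega, show (512 : Int) < tRH by omega, show (1024 : Int) < tRH by omega, show (2048 : Int) < tRH by omega, show ¬((4096 : Int) < tRH) by omega]
  simp [pvScanPairs, pvBisectGo, h0, h1, h2, h3, h4, h5, show (128 : Int) < tRH by omega, show (256 : Int) < tRH by omega, show (512 : Int) < tRH by omega, show (1024 : Int) < tRH by omega, show (2048 : Int) < tRH by omega, show (4096 : Int) < tRH by omega]
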